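-- pv_equiv track=rewrite | github.com/Wafflesmackk/eh | telkom/1bead/client.py | canReserve
-- ===== SOURCE A (Python) =====
-- def canReserve(occupiedRoutes, reserveing,reserved) :
--     if reserved == True:
--         return False
--
--     for route in occupiedRoutes :
--         length = len(route)
--         for i in range(1, length - 1):
--             if route[i] in reserveing :
--                 return False
--     occupiedRoutes.append(reserveing)
--     return True
-- ===== SOURCE B (Python) =====
-- def canReserve(occupiedRoutes, reserveing, reserved):
--     if reserved == True:
--         return False
--     interior = sorted(x for route in occupiedRoutes for x in route[1:-1])
--     target = sorted(reserveing)
--     i = j = 0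
--     while i < len(interior) and j < len(target):
--         if interior[i] < target[j]:
--             i += 1
--         elif target[j] < interior[i]:
--             j += 1
--         else:
--             return False
--     occupiedRoutes.append(reserveing)
--     return True
-- ===== Notes on version B (the rewrite author's own statement) =====
-- stated objective: alternative
-- what changed: B flattens all interior waypoints, sorts them together with a sorted copy of reserveing, and detects a conflict by a two-pointer merge intersection, instead of A's nested per-route index loop with a linear membership scan of reserveing.
import Mathlib
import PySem

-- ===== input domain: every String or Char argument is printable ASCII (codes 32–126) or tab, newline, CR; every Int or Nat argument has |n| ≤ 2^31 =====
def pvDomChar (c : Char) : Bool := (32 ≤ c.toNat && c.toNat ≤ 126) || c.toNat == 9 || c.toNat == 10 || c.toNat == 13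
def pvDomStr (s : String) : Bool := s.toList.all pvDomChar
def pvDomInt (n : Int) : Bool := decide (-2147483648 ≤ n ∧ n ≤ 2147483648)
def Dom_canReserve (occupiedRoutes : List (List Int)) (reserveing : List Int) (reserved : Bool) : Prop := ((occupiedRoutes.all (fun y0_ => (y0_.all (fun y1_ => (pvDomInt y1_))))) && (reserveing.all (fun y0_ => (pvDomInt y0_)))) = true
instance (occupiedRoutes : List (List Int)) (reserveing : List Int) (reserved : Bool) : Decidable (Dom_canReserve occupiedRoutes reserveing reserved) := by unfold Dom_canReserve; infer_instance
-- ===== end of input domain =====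

-- B replaces A's nested per-route index loop by sort-then-merge: flatten all interior
-- waypoints, sort them and a copy of reserveing, and detect a conflict by a two-pointer
-- merge intersection (alternative algorithm, not claimed faster).
-- Both A and B append reserveing to occupiedRoutes exactly when they return True;
-- the equivalence proved here is about the return value only.

-- ===== PORT A =====
-- inner loop 'for i in range(1, length - 1): if route[i] in reserveing: return False';
-- route[i] is always in range on this loop, so pyGetD's default 0 is never used
def canReserveRouteHit (route : List Int) (reserveing : List Int) : Bool :=
  (PySem.List.pyRange 1 ((route.length : Int) - 1) 1).any
    (fun i => reserveing.contains (PySem.List.pyGetD route i 0))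

def canReserve (occupiedRoutes : List (List Int)) (reserveing : List Int) (reserved : Bool) : Bool :=
  if reserved == true then false
  else if occupiedRoutes.any (fun route => canReserveRouteHit route reserveing) then false
  else true

-- ===== PORT B =====
-- B's while loop over two index pointers into the sorted lists, as the obvious
-- structural recursion consuming the two sorted lists from the front
def hasCommon : List Int → List Int → Bool
  | [], _ => false
  | _ :: _, [] => false
  | a :: as, b :: bs =>
    if a < b then hasCommon as (b :: bs)
    else if b < a then hasCommon (a :: as) bs
    else true

def canReserve_alt (occupiedRoutes : List (List Int)) (reserveing : List Int) (reserved : Bool) : Bool :=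
  if reserved == true then false
  else
    let interior := PySem.List.sorted
      (occupiedRoutes.flatMap (fun route => PySem.List.slice route (some 1) (some (-1))))
      (fun x => x) false
    let target := PySem.List.sorted reserveing (fun x => x) false
    if hasCommon interior target then false
    else true

-- ===== PRECONDITION & SPEC =====
def Spec_canReserve (occupiedRoutes : List (List Int)) (reserveing : List Int) (reserved : Bool) (out : Bool) : Prop := out = canReserve_alt occupiedRoutes reserveing reserved
instance (occupiedRoutes : List (List Int)) (reserveing : List Int) (reserved : Bool) (out : Bool) : Decidable (Spec_canReserve occupiedRoutes reserveing reserved out) := by unfold Spec_canReserve; infer_instance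

-- ===== CLAIM (what is proved, stated in full; the proofs are below) =====
def Claim_equal_canReserve : Prop := ∀ (occupiedRoutes : List (List Int)) (reserveing : List Int) (reserved : Bool), Dom_canReserve occupiedRoutes reserveing reserved → Spec_canReserve occupiedRoutes reserveing reserved (canReserve occupiedRoutes reserveing reserved)

-- ===== LEMMAS AND PROOFS =====

-- route[1:-1] is the interior of the route
lemma slice_one_neg_one (r : List Int) :
    PySem.List.slice r (some 1) (some (-1)) = r.dropLast.drop 1 := by
  rcases r with _ | ⟨x, xs⟩
  · rfl
  · simp only [PySem.List.slice, PySem.List.clampIdx]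
    norm_num
    cases xs with
    | nil => rfl
    | cons y ys =>
      rw [if_neg (by simp; omega : ¬(((y :: ys).length : Int) < 0))]
      simp [List.dropLast_eq_take]

-- A's inner index loop over route hits reserveing iff some element of route[1:-1] is in it
lemma routeHit_eq_slice_any (r res : List Int) :
    canReserveRouteHit r res
      = (PySem.List.slice r (some 1) (some (-1))).any (fun x => res.contains x) := by
  rcases r with _ | ⟨x, xs⟩
  · rfl
  · unfold canReserveRouteHit
    rw [slice_one_neg_one]
    have hlen : ((x :: xs).length : Int) - 1 = ((x :: xs).dropLast.length : Int) := by
      simp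
    rw [hlen]
    have hcongr : ∀ i ∈ PySem.List.pyRange 1 (((x :: xs).dropLast.length : Int)) 1,
        res.contains (PySem.List.pyGetD (x :: xs) i 0)
          = res.contains (PySem.List.pyGetD (x :: xs).dropLast i 0) := by
      intro i hi
      rw [PySem.List.mem_pyRange_one] at hi
      obtain ⟨h1, h2⟩ := hi
      have hd : i < ((x :: xs).dropLast.length : Int) := h2
      congr 1
      rw [PySem.List.pyGetD_eq_getElem (x :: xs) 0 (by omega) (by simp at hd ⊢; omega),
          PySem.List.pyGetD_eq_getElem (x :: xs).dropLast 0 (by omega) (by exact hd)]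
      rw [List.getElem_dropLast]
    rw [PySem.List.any_congr_mem hcongr]
    have hmap := PySem.List.map_pyGetD_pyRange' (x :: xs).dropLast 0
      (a := 1) (by norm_num)
    calc ((PySem.List.pyRange 1 ((x :: xs).dropLast.length : Int)).any
            fun i => res.contains (PySem.List.pyGetD (x :: xs).dropLast i 0))
        = ((PySem.List.pyRange 1 ((x :: xs).dropLast.length : Int)).map
            (fun j => PySem.List.pyGetD (x :: xs).dropLast j 0)).any
            (fun x => res.contains x) := by
          rw [List.any_map]; rfl
      _ = ((x :: xs).dropLast.drop 1).any (fun x => res.contains x) := by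
          rw [hmap]; rfl

-- the merge intersection detects exactly a common element of two (≤-sorted) lists
lemma hasCommon_iff : ∀ (as bs : List Int), as.Pairwise (· ≤ ·) → bs.Pairwise (· ≤ ·) →
    (hasCommon as bs = true ↔ ∃ x, x ∈ as ∧ x ∈ bs)
  | [], bs, _, _ => by simp [hasCommon]
  | _ :: _, [], _, _ => by simp [hasCommon]
  | a :: as, b :: bs, ha, hb => by
    rw [hasCommon]
    by_cases hab : a < b
    · rw [if_pos hab, hasCommon_iff as (b :: bs) (List.Pairwise.of_cons ha) hb]
      constructor
      · rintro ⟨x, h1, h2⟩; exact ⟨x, List.mem_cons_of_mem _ h1, h2⟩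
      · rintro ⟨x, h1, h2⟩
        rcases List.mem_cons.mp h1 with rfl | h1
        · exfalso
          rcases List.mem_cons.mp h2 with rfl | h2
          · omega
          · have := (List.pairwise_cons.mp hb).1 x h2; omega
        · exact ⟨x, h1, h2⟩
    · rw [if_neg hab]
      by_cases hba : b < a
      · rw [if_pos hba, hasCommon_iff (a :: as) bs ha (List.Pairwise.of_cons hb)]
        constructor
        · rintro ⟨x, h1, h2⟩; exact ⟨x, h1, List.mem_cons_of_mem _ h2⟩
        · rintro ⟨x, h1, h2⟩
          rcases List.mem_cons.mp h2 with rfl | h2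
          · exfalso
            rcases List.mem_cons.mp h1 with rfl | h1
            · omega
            · have := (List.pairwise_cons.mp ha).1 x h1; omega
          · exact ⟨x, h1, h2⟩
      · rw [if_neg hba]
        have : a = b := by omega
        subst this
        simp only [true_iff]
        exact ⟨a, List.mem_cons_self, List.mem_cons_self⟩

-- ===== VERDICT (by name: the statement is the Claim_ definition above) =====
theorem canReserve_spec : Claim_equal_canReserve := by
  intro occ res rv _
  unfold Spec_canReserve canReserve canReserve_alt
  cases rv
  · simp only [beq_iff_eq, if_neg (by simp : ¬(false = true))]
    have hA : occ.any (fun route => canReserveRouteHit route res)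
        = (occ.flatMap (fun route => PySem.List.slice route (some 1) (some (-1)))).any
            (fun x => res.contains x) := by
      rw [List.any_flatMap]
      exact PySem.List.any_congr_mem (fun r _ => routeHit_eq_slice_any r res)
    have hB : hasCommon
        (PySem.List.sorted (occ.flatMap (fun route => PySem.List.slice route (some 1) (some (-1)))) (fun x => x) false)
        (PySem.List.sorted res (fun x => x) false)
        = (occ.flatMap (fun route => PySem.List.slice route (some 1) (some (-1)))).any
            (fun x => res.contains x) := by
      rw [Bool.eq_iff_iff,
        hasCommon_iff _ _ (PySem.List.sorted_pairwise _ _) (PySem.List.sorted_pairwise _ _)]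
      simp only [List.any_eq_true, PySem.List.mem_sorted, List.contains_iff_mem]
    simp only [hA, hB]
  · rfl
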